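-- pv_equiv track=rewrite | github.com/vilhess/POT | metric_utils.py | adjust_predicts
-- ===== SOURCE A (Python) =====
-- def adjust_predicts(actual, predict):
--     assert len(actual)==len(predict), "labels and detections should have the same shape"
--     for i in range(len(predict)):
--         if actual[i] and predict[i]:
--             for j in range(i, len(predict), 1):
--                 if not actual[j]:
--                     break
--                 else:
--                     predict[j]=1
--     return predict
-- ===== SOURCE B (Python) =====
-- def adjust_predicts(actual, predict):
--     assert len(actual) == len(predict), "labels and detections should have the same shape"
--     fill = False
--     for i, a in enumerate(actual):
--         if not a:
--             fill = False
--         elif predict[i]: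
--             fill = True
--         if fill:
--             predict[i] = 1
--     return predict
-- ===== Notes on version B (the rewrite author's own statement) =====
-- stated objective: faster
-- what changed: replaces A's quadratic per-detection re-fill of each anomaly segment with a single forward pass carrying one fill flag that is raised on a detection inside a segment and cleared at the segment end
import Mathlib
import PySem

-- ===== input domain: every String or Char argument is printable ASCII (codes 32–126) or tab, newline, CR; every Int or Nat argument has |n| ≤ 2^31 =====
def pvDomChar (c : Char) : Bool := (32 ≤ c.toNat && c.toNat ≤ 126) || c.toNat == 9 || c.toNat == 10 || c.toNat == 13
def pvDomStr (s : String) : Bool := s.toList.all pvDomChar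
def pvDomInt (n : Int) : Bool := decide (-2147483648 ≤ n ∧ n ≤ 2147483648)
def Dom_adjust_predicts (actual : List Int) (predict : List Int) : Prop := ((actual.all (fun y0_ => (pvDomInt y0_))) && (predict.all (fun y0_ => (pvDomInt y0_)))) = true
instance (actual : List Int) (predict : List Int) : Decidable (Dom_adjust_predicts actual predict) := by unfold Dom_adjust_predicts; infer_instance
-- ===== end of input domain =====

-- B replaces A's quadratic re-fill of each anomaly segment with one forward pass carrying a
-- fill flag; both Pythons mutate `predict` in place identically, the theorems are about the
-- returned value.

-- ===== PORT A =====
-- inner loop: for j in range(i, len(predict)): if not actual[j]: break else predict[j]=1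
def innerA (actual : List Int) (n : Nat) (j : Nat) (p : List Int) : List Int :=
  if h : j < n then
    if actual.getD j 0 = 0 then p
    else innerA actual n (j + 1) (p.set j 1)
  else p
termination_by n - j

-- outer loop over i
def outerA (actual : List Int) (n : Nat) (i : Nat) (p : List Int) : List Int :=
  if h : i < n then
    if actual.getD i 0 ≠ 0 ∧ p.getD i 0 ≠ 0 then
      outerA actual n (i + 1) (innerA actual n i p)
    else
      outerA actual n (i + 1) p
  else p
termination_by n - i

def adjust_predicts (actual : List Int) (predict : List Int) : List Int :=
  outerA actual predict.length 0 predict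

-- ===== PORT B =====
-- single pass: clear the flag where actual[i]==0, raise it on a detection, write 1 while raised
def altLoop (actual : List Int) (n : Nat) (i : Nat) (fill : Bool) (p : List Int) : List Int :=
  if h : i < n then
    let fill' := if actual.getD i 0 = 0 then false
                 else if p.getD i 0 ≠ 0 then true
                 else fill
    let p' := if fill' then p.set i 1 else p
    altLoop actual n (i + 1) fill' p'
  else p
termination_by n - i

def adjust_predicts_alt (actual : List Int) (predict : List Int) : List Int :=
  altLoop actual actual.length 0 false predict

-- ===== PRECONDITION & SPEC =====
-- Pre_: Python A asserts len(actual)==len(predict) and raises AssertionError otherwise.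
def Pre_adjust_predicts (actual : List Int) (predict : List Int) : Prop :=
  actual.length = predict.length
instance (actual : List Int) (predict : List Int) : Decidable (Pre_adjust_predicts actual predict) := by unfold Pre_adjust_predicts; infer_instance

def pvWitness_adjust_predicts : List Int × List Int := ([1, 1, 0, 1], [0, 1, 0, 0])

def Spec_adjust_predicts (actual : List Int) (predict : List Int) (out : List Int) : Prop := out = adjust_predicts_alt actual predict
instance (actual : List Int) (predict : List Int) (out : List Int) : Decidable (Spec_adjust_predicts actual predict out) := by unfold Spec_adjust_predicts; infer_instance

-- ===== CLAIM (what is proved, stated in full; the proofs are below) =====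
def Claim_equal_adjust_predicts : Prop := ∀ (actual : List Int) (predict : List Int), Dom_adjust_predicts actual predict → Pre_adjust_predicts actual predict → Spec_adjust_predicts actual predict (adjust_predicts actual predict)

-- ===== LEMMAS AND PROOFS =====

theorem innerA_set_comm (actual : List Int) (n : Nat) (i j : Nat) (v : Int) (p : List Int)
    (hij : i < j) : (innerA actual n j p).set i v = innerA actual n j (p.set i v) := by
  fun_induction innerA actual n j p with
  | case1 j p h h0 => rw [innerA, dif_pos h, if_pos h0]
  | case2 j p h h0 ih =>
      conv_rhs => rw [innerA, dif_pos h, if_neg h0]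
      rw [ih (Nat.lt_succ_of_lt hij), List.set_comm _ _ ((Nat.ne_of_lt hij).symm)]
  | case3 j p h => rw [innerA, dif_neg h]

theorem innerA_getD_lt (actual : List Int) (n : Nat) (i j : Nat) (p : List Int)
    (hij : i < j) : (innerA actual n j p).getD i 0 = p.getD i 0 := by
  fun_induction innerA actual n j p with
  | case1 => rfl
  | case2 j p h h0 ih =>
      rw [ih (Nat.lt_succ_of_lt hij)]
      simp [List.getD, List.getElem?_set_ne (Nat.ne_of_lt hij).symm]
  | case3 => rfl

theorem innerA_idem (actual : List Int) (n : Nat) (j : Nat) (p : List Int) :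
    innerA actual n j (innerA actual n j p) = innerA actual n j p := by
  fun_induction innerA actual n j p with
  | case1 j p h h0 => rw [innerA, dif_pos h, if_pos h0]
  | case2 j p h h0 ih =>
      conv_lhs => rw [innerA, dif_pos h, if_neg h0]
      rw [innerA_set_comm _ _ _ _ _ _ (Nat.lt_succ_self j), List.set_set, ih]
  | case3 j p h => rw [innerA, dif_neg h]

-- the loop invariant: A's state equals B's state with the rest of the current segment filled
theorem loop_eq (actual : List Int) (n : Nat) :
    ∀ (k i : Nat) (f : Bool) (p : List Int), n - i ≤ k → n ≤ p.length →
      outerA actual n i (if f then innerA actual n i p else p) = altLoop actual n i f p := by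
  intro k
  induction k with
  | zero =>
      intro i f p hk hn
      have h : ¬ i < n := by omega
      have hfill : innerA actual n i p = p := by rw [innerA, dif_neg h]
      rw [outerA, dif_neg h, altLoop, dif_neg h]
      cases f <;> simp [hfill]
  | succ k ih =>
      intro i f p hk hn
      by_cases h : i < n
      · have hi : i < p.length := lt_of_lt_of_le h hn
        rw [altLoop, dif_pos h]
        dsimp only
        rw [outerA, dif_pos h]
        by_cases ha : actual.getD i 0 = 0
        · -- segment end: A fills nothing from i, both states coincide, the flag clears
          have hfill : innerA actual n i p = p := by rw [innerA, dif_pos h, if_pos ha]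
          have hp' : (if f then innerA actual n i p else p) = p := by cases f <;> simp [hfill]
          rw [hp']
          have hc : ¬ (actual.getD i 0 ≠ 0 ∧ p.getD i 0 ≠ 0) := fun hc => hc.1 ha
          rw [if_neg hc]
          have ha2 : actual[i]?.getD 0 = 0 := by simpa [List.getD] using ha
          have := ih (i + 1) false p (by omega) hn
          simp only [if_neg Bool.false_ne_true] at this
          simpa [ha2] using this
        · have hstep : innerA actual n i p = innerA actual n (i + 1) (p.set i 1) := by
            rw [innerA, dif_pos h, if_neg ha]
          have hlen1 : n ≤ (p.set i 1).length := by simpa using hn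
          by_cases hp : p.getD i 0 ≠ 0
          · -- detection inside a segment: B raises the flag, A fills from i
            have hAval : (if f then innerA actual n i p else p).getD i 0 ≠ 0 := by
              cases f with
              | false => simpa using hp
              | true =>
                  simp only [if_pos]
                  rw [hstep, innerA_getD_lt _ _ _ _ _ (Nat.lt_succ_self i)]
                  simp [List.getD, List.getElem?_set_self hi]
            rw [if_pos ⟨ha, hAval⟩]
            have hfillA : innerA actual n i (if f then innerA actual n i p else p)
                = innerA actual n (i + 1) (p.set i 1) := by
              cases f with
              | false => simpa using hstep
              | true => simp only [if_pos]; rw [innerA_idem, hstep]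
            rw [hfillA]
            have ha2 : ¬ actual[i]?.getD 0 = 0 := by simpa [List.getD] using ha
            have hp2 : ¬ p[i]?.getD 0 = 0 := by simpa [List.getD] using hp
            have := ih (i + 1) true (p.set i 1) (by omega) hlen1
            simp only [if_pos] at this
            simpa [ha2, hp2] using this
          · -- no detection here: the flag keeps its value
            push Not at hp
            cases f with
            | false =>
                have hc : ¬ (actual.getD i 0 ≠ 0 ∧ p.getD i 0 ≠ 0) := fun hc => hc.2 hp
                simp only [if_neg Bool.false_ne_true]
                rw [if_neg hc]
                have ha2 : ¬ actual[i]?.getD 0 = 0 := by simpa [List.getD] using ha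
                have hp2 : p[i]?.getD 0 = 0 := by simpa [List.getD] using hp
                have := ih (i + 1) false p (by omega) hn
                simp only [if_neg Bool.false_ne_true] at this
                simpa [ha2, hp2] using this
            | true =>
                simp only [if_pos]
                have hAval : (innerA actual n i p).getD i 0 ≠ 0 := by
                  rw [hstep, innerA_getD_lt _ _ _ _ _ (Nat.lt_succ_self i)]
                  simp [List.getD, List.getElem?_set_self hi]
                rw [if_pos ⟨ha, hAval⟩, innerA_idem, hstep]
                have ha2 : ¬ actual[i]?.getD 0 = 0 := by simpa [List.getD] using ha
                have hp2 : p[i]?.getD 0 = 0 := by simpa [List.getD] using hp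
                have := ih (i + 1) true (p.set i 1) (by omega) hlen1
                simp only [if_pos] at this
                simpa [ha2, hp2] using this
      · have hfill : innerA actual n i p = p := by rw [innerA, dif_neg h]
        rw [outerA, dif_neg h, altLoop, dif_neg h]
        cases f <;> simp [hfill]

-- ===== VERDICT (by name: the statement is the Claim_ definition above) =====
theorem adjust_predicts_spec : Claim_equal_adjust_predicts := by
  intro actual predict _ hpre
  unfold Pre_adjust_predicts at hpre
  show adjust_predicts actual predict = adjust_predicts_alt actual predict
  unfold adjust_predicts adjust_predicts_alt
  rw [hpre]
  have := loop_eq actual predict.length (predict.length) 0 false predict (by omega) (le_refl _)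
  simpa using this
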